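-- pv_equiv track=rewrite | github.com/woo00oo/codingtest_study | 프로그래머스/위클리 챌린지 1주차.py | solution
-- ===== SOURCE A (Python) =====
-- def solution(price, money, count):
--     total = 0
--
--     for i in range(1, count+1):
--         total += price * i
--
--     money -= total
--
--     if money < 0:
--         return abs(money)
--     else:
--         return 0
-- ===== SOURCE B (Python) =====
-- def solution(price, money, count):
--     n = max(count, 0)
--     total = price * n * (n + 1) // 2
--     shortage = total - money
--     return shortage if shortage > 0 else 0
-- ===== Notes on version B (the rewrite author's own statement) =====
-- stated objective: faster
-- what changed: Replaces the O(count) accumulation loop with the closed-form arithmetic-series sum price*n*(n+1)//2 and a single max(0, total-money).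
import Mathlib
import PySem

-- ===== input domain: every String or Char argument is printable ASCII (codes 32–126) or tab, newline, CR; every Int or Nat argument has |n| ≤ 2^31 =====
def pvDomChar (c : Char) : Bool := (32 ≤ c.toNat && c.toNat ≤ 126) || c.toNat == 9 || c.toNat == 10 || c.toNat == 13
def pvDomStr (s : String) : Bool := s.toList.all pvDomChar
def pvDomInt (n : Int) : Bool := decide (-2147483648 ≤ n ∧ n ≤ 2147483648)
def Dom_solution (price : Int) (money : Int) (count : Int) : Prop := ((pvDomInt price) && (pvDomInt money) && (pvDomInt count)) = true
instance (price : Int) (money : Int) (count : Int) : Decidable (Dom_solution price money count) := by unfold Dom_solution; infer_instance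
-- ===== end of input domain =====

-- B replaces A's summation loop by the closed-form arithmetic-series formula (objective: faster).

-- ===== PORT A =====
def solution (price : Int) (money : Int) (count : Int) : Int :=
  let total := (PySem.List.pyRange 1 (count + 1) 1).foldl (fun t i => t + price * i) 0
  let money := money - total
  if money < 0 then |money| else 0

-- ===== PORT B =====
def solution_alt (price : Int) (money : Int) (count : Int) : Int :=
  let n := max count 0
  let total := PySem.Int.floordiv (price * n * (n + 1)) 2
  let shortage := total - money
  if shortage > 0 then shortage else 0

-- ===== PRECONDITION & SPEC =====
def Spec_solution (price : Int) (money : Int) (count : Int) (out : Int) : Prop := out = solution_alt price money count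
instance (price : Int) (money : Int) (count : Int) (out : Int) : Decidable (Spec_solution price money count out) := by unfold Spec_solution; infer_instance

-- ===== CLAIM (what is proved, stated in full; the proofs are below) =====
def Claim_equal_solution : Prop := ∀ (price : Int) (money : Int) (count : Int), Dom_solution price money count → Spec_solution price money count (solution price money count)

-- ===== LEMMAS AND PROOFS =====

-- the loop total, doubled, equals the closed-form numerator price*m*(m+1)
theorem pv_loop_sum (price : Int) (m : Nat) :
    2 * (PySem.List.pyRange 1 ((m : Int) + 1) 1).foldl (fun t i => t + price * i) 0
      = price * (m : Int) * ((m : Int) + 1) := by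
  induction m with
  | zero => simp
  | succ k ih =>
      have h : PySem.List.pyRange 1 (((k : Int) + 1) + 1) 1
          = PySem.List.pyRange 1 ((k : Int) + 1) 1 ++ [(k : Int) + 1] :=
        PySem.List.pyRange_one_succ_right (by omega : (1:Int) ≤ (k:Int)+1)
      push_cast
      rw [h, List.foldl_append]
      simp only [List.foldl_cons, List.foldl_nil]
      ring_nf
      ring_nf at ih
      linarith

-- the closed form equals the loop total
theorem pv_closed_form (price count : Int) :
    PySem.Int.floordiv (price * max count 0 * (max count 0 + 1)) 2
      = (PySem.List.pyRange 1 (count + 1) 1).foldl (fun t i => t + price * i) 0 := by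
  set T := (PySem.List.pyRange 1 (count + 1) 1).foldl (fun t i => t + price * i) 0 with hT
  have h2 : price * max count 0 * (max count 0 + 1) = 2 * T := by
    rcases (by omega : count ≤ 0 ∨ 0 < count) with hc | hc
    · have hnil : PySem.List.pyRange 1 (count + 1) 1 = [] :=
        PySem.List.pyRange_one_eq_nil (by omega)
      have : max count 0 = 0 := by omega
      simp [hT, hnil, this]
    · have hcast : ((count.toNat : Int)) = count := Int.toNat_of_nonneg (by omega)
      have hmax : max count 0 = count := by omega
      rw [hmax, hT, ← hcast]
      exact (pv_loop_sum price count.toNat).symm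
  rw [h2, PySem.Int.floordiv_eq_iff_of_pos (by omega)]
  omega

-- ===== VERDICT (by name: the statement is the Claim_ definition above) =====
theorem solution_spec : Claim_equal_solution := by
  intro price money count _
  unfold Spec_solution solution solution_alt
  simp only []
  rw [pv_closed_form]
  set T := (PySem.List.pyRange 1 (count + 1) 1).foldl (fun t i => t + price * i) 0
  split_ifs with h1 h2 h2
  · rw [abs_of_neg h1]; ring
  · omega
  · omega
  · rfl
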